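-- pv_equiv track=rewrite | github.com/Saranga7/monograms-retrieval | scripts/analyze_rerankability.py | assign_bucket
-- ===== SOURCE A (Python) =====
-- from collections import OrderedDict
--
-- BUCKETS = OrderedDict([
--     ("top-10",  (1, 10)),
--     ("top-20",  (11, 20)),
--     ("top-50",  (21, 50)),
--     ("top-100", (51, 100)),
--     (">100",    (101, None)),
-- ])
--
-- def assign_bucket(rank: int) -> str:
--     for bucket_name, (low, high) in BUCKETS.items():
--         if high is None:
--             if rank >= low:
--                 return bucket_name
--         else:
--             if low <= rank <= high:
--                 return bucket_name
--     raise ValueError(f"Rank {rank} did not match any bucket.")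
-- ===== SOURCE B (Python) =====
-- _THRESHOLDS = [10, 20, 50, 100]
-- _NAMES = ["top-10", "top-20", "top-50", "top-100", ">100"]
--
-- def assign_bucket(rank: int) -> str:
--     if rank < 1:
--         raise ValueError(f"Rank {rank} did not match any bucket.")
--     idx = sum(1 for t in _THRESHOLDS if rank > t)
--     return _NAMES[idx]
-- ===== Notes on version B (the rewrite author's own statement) =====
-- stated objective: simpler
-- what changed: Replaces the iteration over an OrderedDict of (low, high) ranges by a guard for rank < 1 plus an index computed by counting exceeded upper thresholds into a parallel name list.
import Mathlib
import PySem

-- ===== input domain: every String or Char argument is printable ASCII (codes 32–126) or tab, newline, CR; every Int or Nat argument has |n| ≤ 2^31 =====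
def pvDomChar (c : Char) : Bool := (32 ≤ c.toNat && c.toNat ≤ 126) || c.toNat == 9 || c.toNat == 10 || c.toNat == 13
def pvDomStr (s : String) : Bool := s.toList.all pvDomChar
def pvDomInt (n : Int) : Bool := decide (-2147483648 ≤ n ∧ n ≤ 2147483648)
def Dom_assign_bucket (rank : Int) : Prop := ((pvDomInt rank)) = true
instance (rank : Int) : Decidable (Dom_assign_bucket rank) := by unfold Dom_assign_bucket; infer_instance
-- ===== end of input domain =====

-- B replaces A's scan over an OrderedDict of (low, high) ranges by a rank<1 guard
-- plus an index (count of exceeded thresholds) into a parallel name list (objective: simpler).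


-- ===== PORT A =====
-- BUCKETS: name, low, optional high — same order as the Python OrderedDict
def pvBuckets : List (String × Int × Option Int) :=
  [("top-10", 1, some 10), ("top-20", 11, some 20), ("top-50", 21, some 50),
   ("top-100", 51, some 100), (">100", 101, none)]

-- the for-loop: first matching bucket; none = fall through to the raise
def assign_bucket_loop (rank : Int) : List (String × Int × Option Int) → Option String
  | [] => none
  | (name, low, high) :: rest =>
    match high with
    | none => if rank ≥ low then some name else assign_bucket_loop rank rest
    | some h => if low ≤ rank ∧ rank ≤ h then some name else assign_bucket_loop rank rest

def assign_bucket (rank : Int) : String :=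
  (assign_bucket_loop rank pvBuckets).getD ""   -- "" stands for the ValueError, excluded by Pre_

-- ===== PORT B =====
def pvThresholds : List Int := [10, 20, 50, 100]
def pvNames : List String := ["top-10", "top-20", "top-50", "top-100", ">100"]

def assign_bucket_alt (rank : Int) : String :=
  if rank < 1 then ""   -- the ValueError, excluded by Pre_
  else
    let idx : Int := (pvThresholds.foldl (fun acc t => if rank > t then acc + 1 else acc) 0)
    (PySem.List.pyGet? pvNames idx).getD ""

-- ===== PRECONDITION & SPEC =====
-- Pre_ excludes nonpositive ranks, on which both Pythons raise ValueError (same message)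
def Pre_assign_bucket (rank : Int) : Prop := 1 ≤ rank
instance (rank : Int) : Decidable (Pre_assign_bucket rank) := by unfold Pre_assign_bucket; infer_instance
def pvWitness_assign_bucket : Int := (7)

def Spec_assign_bucket (rank : Int) (out : String) : Prop := out = assign_bucket_alt rank
instance (rank : Int) (out : String) : Decidable (Spec_assign_bucket rank out) := by unfold Spec_assign_bucket; infer_instance

-- ===== CLAIM (what is proved, stated in full; the proofs are below) =====
def Claim_equal_assign_bucket : Prop := ∀ (rank : Int), Dom_assign_bucket rank → Pre_assign_bucket rank → Spec_assign_bucket rank (assign_bucket rank)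

-- ===== LEMMAS AND PROOFS =====

-- ===== VERDICT (by name: the statement is the Claim_ definition above) =====
theorem assign_bucket_spec : Claim_equal_assign_bucket := by
  intro rank _ hpre
  unfold Pre_assign_bucket at hpre
  unfold Spec_assign_bucket assign_bucket assign_bucket_alt assign_bucket_loop pvBuckets pvThresholds pvNames
  simp only [List.foldl]
  split_ifs <;> simp_all [assign_bucket_loop, PySem.List.pyGet?, PySem.List.pyIdx?] <;>
    first
      | omega
      | (split_ifs <;> simp_all <;> omega)
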